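-- pv_equiv track=rewrite | github.com/hzhang092/nist-pqc-rag-agent | rag/graph/helpers.py | _looks_like_algorithm_name
-- ===== SOURCE A (Python) =====
-- def _looks_like_algorithm_name(token: str) -> bool:
--     if not token:
--         return False
--     if any(mark in token for mark in (".", "-", "_")):
--         return True
--     if token.isupper() and any(ch.isalpha() for ch in token):
--         return True
--     tail = token[1:] if len(token) > 1 else ""
--     return any(ch.isupper() for ch in tail)
-- ===== SOURCE B (Python) =====
-- def _looks_like_algorithm_name(token: str) -> bool:
--     if not token:
--         return False
--     has_sep = saw_alpha = saw_lower = upper_in_tail = False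
--     for i, ch in enumerate(token):
--         if ch in ".-_":
--             has_sep = True
--         if ch.isalpha():
--             saw_alpha = True
--         if ch.islower():
--             saw_lower = True
--         if i > 0 and ch.isupper():
--             upper_in_tail = True
--     return has_sep or (saw_alpha and not saw_lower) or upper_in_tail
-- ===== Notes on version B (the rewrite author's own statement) =====
-- stated objective: alternative
-- what changed: Replaced A's four separate scans (membership test per separator, isupper(), isalpha() generator, tail isupper scan) by one enumerate loop that sets boolean flags and combines them at the end.
import Mathlib
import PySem

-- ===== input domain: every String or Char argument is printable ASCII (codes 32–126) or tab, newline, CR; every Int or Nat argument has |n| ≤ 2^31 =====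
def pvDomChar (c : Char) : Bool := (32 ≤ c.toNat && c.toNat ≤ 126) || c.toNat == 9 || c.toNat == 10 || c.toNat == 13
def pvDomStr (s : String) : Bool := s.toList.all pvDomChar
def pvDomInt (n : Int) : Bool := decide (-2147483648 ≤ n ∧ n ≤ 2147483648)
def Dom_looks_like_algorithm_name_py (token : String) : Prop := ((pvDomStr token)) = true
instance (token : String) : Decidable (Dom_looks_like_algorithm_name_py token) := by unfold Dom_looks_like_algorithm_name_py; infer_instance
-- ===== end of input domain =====

-- B replaces A's several scans (separator membership, isupper(), isalpha(), tail scan)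
-- by a single indexed pass setting boolean flags; same return value on the ASCII domain.


-- ===== PORT A =====
-- token.isupper(): at least one cased char and every cased char uppercase.
-- On the ASCII domain the cased characters are exactly the alphabetic ones, so this
-- hand port (exact on ASCII) uses isalpha for "cased".
def pyIsupperStr (cs : List Char) : Bool :=
  cs.any PySem.Chars.isalpha && cs.all (fun c => !PySem.Chars.islower c)

def looks_like_algorithm_name_py (token : String) : Bool :=
  let cs := token.toList
  if cs = [] then false
  else if [('.' : Char), '-', '_'].any (fun m => cs.contains m) then true
    -- 'mark in token' for one-char marks is exactly character membership
  else if pyIsupperStr cs && cs.any PySem.Chars.isalpha then true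
  else
    let tail := if cs.length > 1 then PySem.List.slice cs (some 1) none else []
    tail.any PySem.Chars.isupper

-- ===== PORT B =====
-- single pass over (char, index) pairs accumulating four flags, as in Source B
def altStep (st : Bool × Bool × Bool × Bool) (p : Char × Nat) : Bool × Bool × Bool × Bool :=
  ((st.1 || (p.1 = '.' || p.1 = '-' || p.1 = '_') : Bool),
   (st.2.1 || PySem.Chars.isalpha p.1 : Bool),
   (st.2.2.1 || PySem.Chars.islower p.1 : Bool),
   (st.2.2.2 || (decide (0 < p.2) && PySem.Chars.isupper p.1) : Bool))

def looks_like_algorithm_name_py_alt (token : String) : Bool :=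
  let cs := token.toList
  if cs = [] then false
  else
    let st := (cs.zipIdx).foldl altStep (false, false, false, false)
    st.1 || (st.2.1 && !st.2.2.1) || st.2.2.2

-- ===== PRECONDITION & SPEC =====
def Spec_looks_like_algorithm_name_py (token : String) (out : Bool) : Prop := out = looks_like_algorithm_name_py_alt token
instance (token : String) (out : Bool) : Decidable (Spec_looks_like_algorithm_name_py token out) := by unfold Spec_looks_like_algorithm_name_py; infer_instance

-- ===== CLAIM (what is proved, stated in full; the proofs are below) =====
def Claim_equal_looks_like_algorithm_name_py : Prop := ∀ (token : String), Dom_looks_like_algorithm_name_py token → Spec_looks_like_algorithm_name_py token (looks_like_algorithm_name_py token)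

-- ===== LEMMAS AND PROOFS =====

-- the fold computes the four "any" flags
lemma altStep_foldl (l : List Char) (n : Nat) (st : Bool × Bool × Bool × Bool) :
    (l.zipIdx n).foldl altStep st =
      (st.1 || l.any (fun c => c = '.' || c = '-' || c = '_'),
       st.2.1 || l.any PySem.Chars.isalpha,
       st.2.2.1 || l.any PySem.Chars.islower,
       st.2.2.2 || (l.zipIdx n).any (fun p => decide (0 < p.2) && PySem.Chars.isupper p.1)) := by
  induction l generalizing n st with
  | nil => simp
  | cons c cs ih =>
      simp [List.zipIdx_cons, List.foldl_cons, ih, altStep, Bool.or_assoc]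

-- with all indices positive, the tail-uppercase flag is a plain any
lemma zipIdx_any_upper (l : List Char) (n : Nat) (hn : 0 < n) :
    (l.zipIdx n).any (fun p => decide (0 < p.2) && PySem.Chars.isupper p.1)
      = l.any PySem.Chars.isupper := by
  induction l generalizing n with
  | nil => simp
  | cons c cs ih =>
      simp [List.zipIdx_cons, hn, ih (n + 1) (Nat.succ_pos n)]

-- A's separator membership scan equals B's per-character separator predicate
lemma sep_eq (l : List Char) :
    ([('.' : Char), '-', '_'].any (fun m => l.contains m))
      = l.any (fun x => x = '.' || x = '-' || x = '_') := by
  rw [Bool.eq_iff_iff]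
  simp only [List.any_eq_true, List.contains_eq_mem, List.mem_cons,
    decide_eq_true_eq, Bool.or_eq_true]
  constructor
  · rintro ⟨m, hm, hmem⟩
    refine ⟨m, hmem, ?_⟩
    simp only [List.not_mem_nil, or_false] at hm
    tauto
  · rintro ⟨x, hx, hc⟩
    refine ⟨x, ?_, hx⟩
    simp only [List.not_mem_nil, or_false]
    tauto

-- A's guarded token[1:] of a cons cell is its tail (for uppercase scanning)
lemma tail_any_eq (c : Char) (cs : List Char) :
    ((if (c :: cs).length > 1 then PySem.List.slice (c :: cs) (some 1) none else []).any
        PySem.Chars.isupper) = cs.any PySem.Chars.isupper := by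
  cases cs with
  | nil => simp
  | cons d ds => simp [PySem.List.slice]

-- ===== VERDICT (by name: the statement is the Claim_ definition above) =====
theorem looks_like_algorithm_name_py_spec : Claim_equal_looks_like_algorithm_name_py := by
  intro token _
  unfold Spec_looks_like_algorithm_name_py
  unfold looks_like_algorithm_name_py looks_like_algorithm_name_py_alt
  cases h : token.toList with
  | nil => simp
  | cons c cs =>
      simp only [reduceCtorEq, if_false]
      rw [altStep_foldl, sep_eq, tail_any_eq]
      simp only [pyIsupperStr, List.all_eq_not_any_not, Bool.not_not, List.zipIdx_cons,
        List.any_cons, Bool.false_or]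
      rw [zipIdx_any_upper cs 1 Nat.one_pos]
      cases hS : ((c :: cs).any fun x => x = '.' || x = '-' || x = '_') <;>
        cases hA : ((c :: cs).any PySem.Chars.isalpha) <;>
          cases hL : ((c :: cs).any PySem.Chars.islower) <;>
            cases hT : (cs.any PySem.Chars.isupper) <;>
              simp only [List.any_cons] at hS hA hL ⊢ <;> simp [hS, hA, hL, hT]
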